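-- pv_equiv track=rewrite | github.com/FlyingPumba/biases-in-the-blind-spot | biases_in_the_blind_spot/concept_pipeline/api_llm_base.py | _get_model_id
-- ===== SOURCE A (Python) =====
-- def _get_model_id(model_name: str) -> str:
--     """Get the model ID, stripping any provider prefix if present.
--
--     Examples:
--         'openai/gpt-4o' -> 'gpt-4o'
--         'anthropic:claude-3' -> 'claude-3'
--         'gpt-4o-mini' -> 'gpt-4o-mini' (no prefix, returned as-is)
--     """
--     assert isinstance(model_name, str) and len(model_name) > 0
--     # Check for common provider prefixes and strip them
--     for sep in ["/", ":"]:
--         if sep in model_name: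
--             prefix, model_id = model_name.split(sep, 1)
--             # Only strip if prefix looks like a provider name
--             if prefix.lower() in {
--                 "openai",
--                 "anthropic",
--                 "google",
--                 "mistral",
--                 "mistralai",
--             }:
--                 return model_id
--     # No prefix found, return as-is
--     return model_name
-- ===== SOURCE B (Python) =====
-- _PROVIDERS = ("openai", "anthropic", "google", "mistral", "mistralai")
--
--
-- def _get_model_id(model_name: str) -> str:
--     """Strip a known provider prefix ('provider/' or 'provider:') from a model name.
--
--     Single anchored scan: for each known provider, check whether the name starts
--     with it (case-insensitively) followed immediately by '/' or ':'; if so return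
--     the remainder, otherwise return the name unchanged.
--     """
--     assert isinstance(model_name, str) and len(model_name) > 0
--     low = model_name.lower()
--     for provider in _PROVIDERS:
--         n = len(provider)
--         if low.startswith(provider) and n < len(model_name) and model_name[n] in ("/", ":"):
--             return model_name[n + 1:]
--     return model_name
-- ===== Notes on version B (the rewrite author's own statement) =====
-- stated objective: alternative
-- what changed: A loops over the two separators, splitting the string at the first occurrence and testing the prefix against a provider set; B loops over the five providers once, testing each as an anchored case-insensitive prefix followed by '/' or ':' and slicing off the match, with no split and no containment scan.
import Mathlib
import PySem

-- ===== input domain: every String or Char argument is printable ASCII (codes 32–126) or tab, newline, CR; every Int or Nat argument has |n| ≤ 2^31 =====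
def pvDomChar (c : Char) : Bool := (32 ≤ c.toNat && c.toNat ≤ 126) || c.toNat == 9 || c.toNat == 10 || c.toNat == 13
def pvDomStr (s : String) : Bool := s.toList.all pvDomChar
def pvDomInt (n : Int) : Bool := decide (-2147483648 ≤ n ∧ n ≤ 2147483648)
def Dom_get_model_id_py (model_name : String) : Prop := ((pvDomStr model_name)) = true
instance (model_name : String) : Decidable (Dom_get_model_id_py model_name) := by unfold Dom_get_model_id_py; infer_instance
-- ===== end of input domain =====

-- B replaces A's loop over the two separators (containment test + split + set lookup)
-- by one anchored pass over the five providers (case-insensitive prefix + following '/' or ':').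
-- Objective: alternative (same cost on realistic names; only the first few characters are examined by B).


-- ===== PORT A =====
-- the provider names (A's set literal / B's tuple, same five strings)
def pvProviders : List (List Char) :=
  ["openai".toList, "anthropic".toList, "google".toList, "mistral".toList, "mistralai".toList]

-- one iteration of A's `for sep in ["/", ":"]` body; `none` = fall through to the next sep
def pvTrySep (l : List Char) (sep : Char) : Option (List Char) :=
  if PySem.Chars.isIn [sep] l then
    match PySem.Chars.splitOnMax l [sep] 1 with
    | [pre, rest] => if PySem.Chars.lower pre ∈ pvProviders then some rest else none
    | _ => none    -- unreachable: with `sep in model_name`, split(sep, 1) has exactly 2 parts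
  else none

def pvLoopA (l : List Char) : List Char → Option (List Char)
  | [] => none
  | sep :: seps =>
    match pvTrySep l sep with
    | some r => some r
    | none => pvLoopA l seps

def get_model_id_py (model_name : String) : String :=
  match pvLoopA model_name.toList ['/', ':'] with
  | some r => String.ofList r
  | none => model_name

-- ===== PORT B =====
-- B's loop over the providers: first provider that is a prefix of `low` and is
-- followed in `l` by '/' or ':' wins; `none` = fall through to `return model_name`
def pvGoB (l low : List Char) : List (List Char) → Option (List Char)
  | [] => none
  | p :: ps =>
    if PySem.Chars.startswith low p
        && decide (p.length < l.length)
        && (PySem.List.pyGet? l (p.length : Int)).any (fun c => c == '/' || c == ':') then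
      some (PySem.List.slice l (some ((p.length : Int) + 1)) none)
    else pvGoB l low ps

def get_model_id_py_alt (model_name : String) : String :=
  let l := model_name.toList
  match pvGoB l (PySem.Chars.lower l) pvProviders with
  | some r => String.ofList r
  | none => model_name

-- ===== PRECONDITION & SPEC =====
-- A (and B) assert len(model_name) > 0 and raise AssertionError on the empty string; Pre_ excludes exactly that input.
def Pre_get_model_id_py (model_name : String) : Prop := model_name ≠ ""
instance (model_name : String) : Decidable (Pre_get_model_id_py model_name) := by unfold Pre_get_model_id_py; infer_instance
def pvWitness_get_model_id_py : String := "openai/gpt-4o"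

def Spec_get_model_id_py (model_name : String) (out : String) : Prop := out = get_model_id_py_alt model_name
instance (model_name : String) (out : String) : Decidable (Spec_get_model_id_py model_name out) := by unfold Spec_get_model_id_py; infer_instance

-- ===== CLAIM (what is proved, stated in full; the proofs are below) =====
def Claim_equal_get_model_id_py : Prop := ∀ (model_name : String), Dom_get_model_id_py model_name → Pre_get_model_id_py model_name → Spec_get_model_id_py model_name (get_model_id_py model_name)

-- ===== LEMMAS AND PROOFS =====

-- the canonical description both programs decide: some provider (lower-cased),
-- immediately followed by '/' or ':', is a prefix of the input
def pvCanStrip (l : List Char) : Prop :=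
  ∃ pre c rest, l = pre ++ c :: rest ∧ (c = '/' ∨ c = ':') ∧ pre.map PySem.Chars.lowerChar ∈ pvProviders

lemma pv_go_zero (sep : List Char) (fuel : Nat) (l cur : List Char) (acc : List (List Char)) :
    PySem.Chars.splitOnMax.go sep fuel 0 l cur acc = ((cur.reverse ++ l) :: acc).reverse := by
  cases fuel with
  | zero => rw [PySem.Chars.splitOnMax.go.eq_def]
  | succ f => cases l with
    | nil => rw [PySem.Chars.splitOnMax.go.eq_def]; simp
    | cons c cs => rw [PySem.Chars.splitOnMax.go.eq_def]; simp

lemma pv_go_one (c : Char) (pre : List Char) : ∀ (fuel : Nat) (cur : List Char) (acc : List (List Char)) (rest : List Char),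
    c ∉ pre → pre.length + rest.length + 1 < fuel →
    PySem.Chars.splitOnMax.go [c] fuel 1 (pre ++ c :: rest) cur acc = (rest :: (cur.reverse ++ pre) :: acc).reverse := by
  induction pre with
  | nil =>
    intro fuel cur acc rest _ hf
    cases fuel with
    | zero => omega
    | succ f =>
      rw [PySem.Chars.splitOnMax.go.eq_def]
      simp only [List.nil_append, List.isPrefixOf, beq_self_eq_true, Bool.true_and, List.length_cons]
      norm_num
      rw [pv_go_zero]
      simp
  | cons a pre ih =>
    intro fuel cur acc rest hmem hf
    cases fuel with
    | zero => simp at hf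
    | succ f =>
      have hca : ¬ (c = a) := fun h => hmem (by simp [h])
      rw [PySem.Chars.splitOnMax.go.eq_def]
      simp only [List.cons_append, List.isPrefixOf, Bool.and_true, beq_iff_eq]
      norm_num [hca]
      rw [ih f (a :: cur) acc rest (fun h => hmem (by simp [h])) (by simp at hf ⊢; omega)]
      simp

-- split(sep, 1) at the first occurrence of a single-character separator
lemma pv_split1 (c : Char) (pre rest : List Char) (h : c ∉ pre) :
    PySem.Chars.splitOnMax (pre ++ c :: rest) [c] 1 = [pre, rest] := by
  rw [PySem.Chars.splitOnMax]
  rw [if_neg (by norm_num), Int.toNat_one]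
  rw [pv_go_one c pre _ [] [] rest h (by simp)]
  simp

lemma pv_firstSplit (c : Char) : ∀ (l : List Char), c ∈ l → ∃ pre rest, l = pre ++ c :: rest ∧ c ∉ pre := by
  intro l hl
  induction l with
  | nil => simp at hl
  | cons a l ih =>
    by_cases hac : c = a
    · exact ⟨[], l, by simp [hac], by simp⟩
    · have hcl : c ∈ l := by
        rcases List.mem_cons.1 hl with h | h
        · exact absurd h hac
        · exact h
      obtain ⟨pre, rest, heq, hmem⟩ := ih hcl
      exact ⟨a :: pre, rest, by simp [heq], by simp [hmem, hac]⟩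

lemma pv_noSep : ∀ p ∈ pvProviders, '/' ∉ p ∧ ':' ∉ p := by decide

lemma pv_lowerSep : PySem.Chars.lowerChar '/' = '/' ∧ PySem.Chars.lowerChar ':' = ':' := by decide

lemma pv_sep_not_mem_pre {pre : List Char} {c : Char}
    (hp : pre.map PySem.Chars.lowerChar ∈ pvProviders) (hc : c = '/' ∨ c = ':') : c ∉ pre := by
  intro hmem
  have hlc : PySem.Chars.lowerChar c = c := by rcases hc with rfl | rfl <;> simp [pv_lowerSep.1, pv_lowerSep.2]
  have : c ∈ pre.map PySem.Chars.lowerChar := hlc ▸ List.mem_map_of_mem hmem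
  obtain ⟨h1, h2⟩ := pv_noSep _ hp
  rcases hc with rfl | rfl
  · exact h1 this
  · exact h2 this

-- a provider-followed-by-separator prefix is unique
lemma pv_uniq_aux {pre1 pre2 r1 r2 : List Char} {c1 c2 : Char}
    (hpre : pre1 <+: pre2) (he : pre1 ++ c1 :: r1 = pre2 ++ c2 :: r2)
    (hs1 : c1 = '/' ∨ c1 = ':')
    (hp2 : pre2.map PySem.Chars.lowerChar ∈ pvProviders) :
    pre1 = pre2 ∧ c1 = c2 ∧ r1 = r2 := by
  obtain ⟨t, rfl⟩ := hpre
  cases t with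
  | nil =>
    have h : c1 = c2 ∧ r1 = r2 := by simpa using he
    exact ⟨by simp, h.1, h.2⟩
  | cons d t' =>
    exfalso
    have h2 : c1 = d ∧ r1 = t' ++ c2 :: r2 := by simpa using he
    have hcd : c1 = d := h2.1
    have hmem : c1 ∈ pre1 ++ d :: t' := by
      rw [hcd]; exact List.mem_append_right _ List.mem_cons_self
    exact pv_sep_not_mem_pre hp2 hs1 hmem

lemma pv_uniq {l pre1 pre2 r1 r2 : List Char} {c1 c2 : Char}
    (he1 : l = pre1 ++ c1 :: r1) (he2 : l = pre2 ++ c2 :: r2)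
    (hs1 : c1 = '/' ∨ c1 = ':') (hs2 : c2 = '/' ∨ c2 = ':')
    (hp1 : pre1.map PySem.Chars.lowerChar ∈ pvProviders)
    (hp2 : pre2.map PySem.Chars.lowerChar ∈ pvProviders) :
    pre1 = pre2 ∧ c1 = c2 ∧ r1 = r2 := by
  have he : pre1 ++ c1 :: r1 = pre2 ++ c2 :: r2 := he1 ▸ he2
  have hpp1 : pre1 <+: l := he1 ▸ ⟨c1 :: r1, rfl⟩
  have hpp2 : pre2 <+: l := he2 ▸ ⟨c2 :: r2, rfl⟩
  rcases List.prefix_or_prefix_of_prefix hpp1 hpp2 with h | h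
  · exact pv_uniq_aux h he hs1 hp2
  · obtain ⟨ha, hb, hc⟩ := pv_uniq_aux h he.symm hs2 hp1
    exact ⟨ha.symm, hb.symm, hc.symm⟩

-- B's loop condition holds exactly on a provider-followed-by-separator prefix
lemma pv_cond_iff (l p : List Char) :
    (PySem.Chars.startswith (l.map PySem.Chars.lowerChar) p
        && decide (p.length < l.length)
        && (PySem.List.pyGet? l (p.length : Int)).any (fun c => c == '/' || c == ':')) = true
      ↔ ∃ c rest, l = l.take p.length ++ c :: rest ∧ (c = '/' ∨ c = ':') ∧ (l.take p.length).map PySem.Chars.lowerChar = p := by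
  constructor
  · intro h
    simp only [Bool.and_eq_true, decide_eq_true_eq] at h
    obtain ⟨⟨hsw, hlen⟩, hany⟩ := h
    have hpre : p <+: l.map PySem.Chars.lowerChar := (PySem.Chars.startswith_iff _ _).1 hsw
    have htake : (l.take p.length).map PySem.Chars.lowerChar = p := by
      rw [List.map_take]
      exact (List.prefix_iff_eq_take.1 hpre).symm
    rw [PySem.List.pyGet?_natCast] at hany
    rw [List.getElem?_eq_getElem hlen] at hany
    simp only [Option.any_some, Bool.or_eq_true, beq_iff_eq] at hany
    refine ⟨l[p.length], l.drop (p.length + 1), ?_, hany, htake⟩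
    conv_lhs => rw [← List.take_append_drop p.length l]
    rw [← List.getElem_cons_drop]
  · rintro ⟨c, rest, heq, hsep, hmap⟩
    have hlenp : (l.take p.length).length = p.length := by
      conv_rhs => rw [← hmap]
      simp
    have hllen : p.length < l.length := by
      conv_rhs => rw [heq]
      simp [hlenp]
    simp only [Bool.and_eq_true, decide_eq_true_eq]
    refine ⟨⟨?_, hllen⟩, ?_⟩
    · rw [PySem.Chars.startswith_iff, ← hmap, List.map_take]
      exact List.take_prefix _ _
    · rw [PySem.List.pyGet?_natCast]
      have hg : l[p.length]? = some c := by
        rw [heq, List.getElem?_append_right (le_of_eq hlenp)]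
        simp [hlenp]
      rw [hg]
      simp only [Option.any_some, Bool.or_eq_true, beq_iff_eq]
      exact hsep

-- the value B returns when its condition fires
lemma pv_slice_val {l pre rest : List Char} {c : Char} (heq : l = pre ++ c :: rest) {n : Nat}
    (hlen : pre.length = n) :
    PySem.List.slice l (some ((n : Int) + 1)) none = rest := by
  have hcast : ((n : Int) + 1) = ((n + 1 : Nat) : Int) := by push_cast; ring
  rw [hcast, PySem.List.slice_from_natCast, heq]
  have h2 : pre ++ c :: rest = (pre ++ [c]) ++ rest := by simp
  rw [h2, List.drop_append_of_le_length (by simp [hlen])]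
  simp [hlen]

-- A's per-separator step returns the remainder on a provider decomposition …
lemma pv_trySep_some {pre rest : List Char} {c : Char} (hsep : c = '/' ∨ c = ':')
    (hp : pre.map PySem.Chars.lowerChar ∈ pvProviders) :
    pvTrySep (pre ++ c :: rest) c = some rest := by
  have hnot : c ∉ pre := pv_sep_not_mem_pre hp hsep
  have hin : PySem.Chars.isIn [c] (pre ++ c :: rest) = true := by
    rw [PySem.Chars.isIn_iff_infix, List.singleton_infix_iff]
    exact List.mem_append_right _ List.mem_cons_self
  simp only [pvTrySep, hin, if_true, pv_split1 c pre rest hnot]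
  simp [PySem.Chars.lower, hp]

-- … and falls through when no provider decomposition with that separator exists
lemma pv_trySep_none {l : List Char} {c : Char}
    (h : ∀ pre rest, l = pre ++ c :: rest → c ∉ pre → pre.map PySem.Chars.lowerChar ∉ pvProviders) :
    pvTrySep l c = none := by
  by_cases hin : PySem.Chars.isIn [c] l = true
  · have hmem : c ∈ l := (List.singleton_infix_iff _ _).1 ((PySem.Chars.isIn_iff_infix _ _).1 hin)
    obtain ⟨pre, rest, heq, hnp⟩ := pv_firstSplit c l hmem
    subst heq
    simp only [pvTrySep, hin, if_true, pv_split1 c pre rest hnp]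
    simp [PySem.Chars.lower, h pre rest rfl hnp]
  · simp [pvTrySep, hin]

-- B's loop: returns the remainder on a provider decomposition …
lemma pv_goB_some {l pre rest : List Char} {c : Char} (heq : l = pre ++ c :: rest)
    (hsep : c = '/' ∨ c = ':') (hp : pre.map PySem.Chars.lowerChar ∈ pvProviders) :
    ∀ qs : List (List Char), (∀ q ∈ qs, q ∈ pvProviders) → pre.map PySem.Chars.lowerChar ∈ qs →
      pvGoB l (l.map PySem.Chars.lowerChar) qs = some rest := by
  intro qs
  induction qs with
  | nil => intro _ h; simp at h
  | cons q qs ih =>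
    intro hqs hmem
    by_cases hq : q = pre.map PySem.Chars.lowerChar
    · have hpl : pre.length = q.length := by rw [hq]; simp
      have hpre_take : l.take q.length = pre := by rw [heq]; exact List.take_left' hpl
      have hcond := (pv_cond_iff l q).2 ⟨c, rest, by rw [hpre_take, ← heq], hsep, by rw [hpre_take, hq]⟩
      simp only [pvGoB, hcond, if_true]
      rw [pv_slice_val heq hpl]
    · have hcond : (PySem.Chars.startswith (l.map PySem.Chars.lowerChar) q
          && decide (q.length < l.length)
          && (PySem.List.pyGet? l (q.length : Int)).any (fun c => c == '/' || c == ':')) = false := by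
        by_contra hne
        have ht := (pv_cond_iff l q).1 (by revert hne; cases (PySem.Chars.startswith (l.map PySem.Chars.lowerChar) q
          && decide (q.length < l.length)
          && (PySem.List.pyGet? l (q.length : Int)).any (fun c => c == '/' || c == ':')) <;> simp)
        obtain ⟨c', rest', heq', hsep', hmap'⟩ := ht
        have hqprov : q ∈ pvProviders := hqs q List.mem_cons_self
        obtain ⟨hpp, _, _⟩ := pv_uniq heq' heq hsep' hsep (hmap'.symm ▸ hqprov) hp
        exact hq (by rw [← hmap', hpp])
      simp only [pvGoB, hcond, Bool.false_eq_true, if_false]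
      have hmem' : pre.map PySem.Chars.lowerChar ∈ qs := by
        rcases List.mem_cons.1 hmem with h | h
        · exact absurd h.symm hq
        · exact h
      exact ih (fun q hm => hqs q (List.mem_cons_of_mem _ hm)) hmem'

-- … and falls through when the input has no provider decomposition at all
lemma pv_goB_none {l : List Char} (h : ¬ pvCanStrip l) :
    ∀ qs : List (List Char), (∀ q ∈ qs, q ∈ pvProviders) →
      pvGoB l (l.map PySem.Chars.lowerChar) qs = none := by
  intro qs
  induction qs with
  | nil => intro _; rfl
  | cons q qs ih =>
    intro hqs
    have hcond : (PySem.Chars.startswith (l.map PySem.Chars.lowerChar) q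
        && decide (q.length < l.length)
        && (PySem.List.pyGet? l (q.length : Int)).any (fun c => c == '/' || c == ':')) = false := by
      by_contra hne
      have ht := (pv_cond_iff l q).1 (by revert hne; cases (PySem.Chars.startswith (l.map PySem.Chars.lowerChar) q
        && decide (q.length < l.length)
        && (PySem.List.pyGet? l (q.length : Int)).any (fun c => c == '/' || c == ':')) <;> simp)
      obtain ⟨c', rest', heq', hsep', hmap'⟩ := ht
      exact h ⟨l.take q.length, c', rest', heq', hsep', hmap'.symm ▸ hqs q List.mem_cons_self⟩
    simp only [pvGoB, hcond, Bool.false_eq_true, if_false]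
    exact ih (fun q hm => hqs q (List.mem_cons_of_mem _ hm))

-- the two loops agree on every input
lemma pv_loops_agree (l : List Char) :
    pvLoopA l ['/', ':'] = pvGoB l (PySem.Chars.lower l) pvProviders := by
  have hlow : PySem.Chars.lower l = l.map PySem.Chars.lowerChar := rfl
  rw [hlow]
  by_cases hcs : pvCanStrip l
  · obtain ⟨pre, c, rest, heq, hsep, hp⟩ := hcs
    have hB := pv_goB_some heq hsep hp pvProviders (fun q hq => hq) hp
    rw [hB]
    rcases hsep with rfl | rfl
    · rw [heq]
      simp [pvLoopA, pv_trySep_some (Or.inl rfl) hp]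
    · have h1 : pvTrySep l '/' = none := by
        apply pv_trySep_none
        intro pre' rest' heq' _ hp'
        obtain ⟨_, hc, _⟩ := pv_uniq heq' heq (Or.inl rfl) (Or.inr rfl) hp' hp
        exact absurd hc (by decide)
      have h2 : pvTrySep l ':' = some rest := heq ▸ pv_trySep_some (Or.inr rfl) hp
      simp [pvLoopA, h1, h2]
  · have hA : ∀ c, (c = '/' ∨ c = ':') → pvTrySep l c = none := by
      intro c hc
      apply pv_trySep_none
      intro pre rest heq _
      exact fun hmem => hcs ⟨pre, c, rest, heq, hc, hmem⟩
    rw [pv_goB_none hcs pvProviders (fun q hq => hq)]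
    simp [pvLoopA, hA '/' (Or.inl rfl), hA ':' (Or.inr rfl)]

-- ===== VERDICT (by name: the statement is the Claim_ definition above) =====
theorem get_model_id_py_spec : Claim_equal_get_model_id_py := by
  intro s _ _
  simp only [Spec_get_model_id_py, get_model_id_py, get_model_id_py_alt]
  rw [pv_loops_agree s.toList]
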